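-- pv_equiv track=rewrite | github.com/SuperSamilam/AreUPredictable | Python/PatternFinder.py | aritmeticPredictorRaw
-- ===== SOURCE A (Python) =====
-- def aritmeticPredictorRaw(input, maxStrenght):
--     differences = {
--         1:0,
--         2:0,
--         3:0,
--         4:0,
--         -1:0,
--         -2:0,
--         -3:0,
--         -4:0
--     }
--
--     if (len(input) >= maxStrenght):
--         for d in differences:
--             for i in range(len(input) - 1, len(input) - maxStrenght, -1):
--                 newValue = input[i] - d
--                 if (newValue == 0): newValue = 9
--                 if (newValue == 10): newValue = 1
--
--                 if (newValue == input[i-1]):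
--                     differences[d] += 1
--                 else:
--                     break
--
--     #Returns a dictionary of each number and how deep it goes untill it finds a new value
--     return differences
-- ===== SOURCE B (Python) =====
-- def aritmeticPredictorRaw(input, maxStrenght):
--     keys = [1, 2, 3, 4, -1, -2, -3, -4]
--     counts = {d: 0 for d in keys}
--     n = len(input)
--     if n >= maxStrenght:
--         active = keys
--         for i in range(n - 1, n - maxStrenght, -1):
--             cur, prev = input[i], input[i - 1]
--             still = []
--             for d in active:
--                 v = cur - d
--                 if v == 0:
--                     v = 9
--                 if v == 10:
--                     v = 1
--                 if v == prev:
--                     counts[d] += 1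
--                     still.append(d)
--             active = still
--             if not active:
--                 break
--     return counts
-- ===== Notes on version B (the rewrite author's own statement) =====
-- stated objective: alternative
-- what changed: A scans the backward index range up to eight times, once per candidate difference with its own break; B builds the same dict but makes a single backward pass over the indices, maintaining the list of still-active differences and stopping when it empties.
import Mathlib
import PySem

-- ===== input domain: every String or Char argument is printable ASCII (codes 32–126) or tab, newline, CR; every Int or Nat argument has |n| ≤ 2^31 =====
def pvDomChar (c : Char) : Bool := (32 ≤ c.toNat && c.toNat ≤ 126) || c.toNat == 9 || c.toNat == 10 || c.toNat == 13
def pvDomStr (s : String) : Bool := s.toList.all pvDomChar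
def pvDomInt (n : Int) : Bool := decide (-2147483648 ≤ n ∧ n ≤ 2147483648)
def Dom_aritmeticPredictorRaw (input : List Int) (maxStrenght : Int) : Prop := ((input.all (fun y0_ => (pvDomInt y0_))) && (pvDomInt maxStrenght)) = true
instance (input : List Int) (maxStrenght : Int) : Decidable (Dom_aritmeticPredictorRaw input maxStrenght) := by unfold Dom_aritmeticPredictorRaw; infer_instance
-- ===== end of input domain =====

-- B replaces A's eight independent backward scans (one per difference, each with its own break)
-- by a single backward pass over the indices that maintains the set of still-active differences;
-- objective: alternative (same asymptotic cost, different traversal).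

-- ===== PORT A =====
-- the two sequential "if" rewrites of newValue (0 -> 9, then 10 -> 1)
def pvWrap (v : Int) : Int :=
  let v1 := if v = 0 then 9 else v
  if v1 = 10 then 1 else v1

-- inner 'for i in range(...)' loop of A for a fixed difference d, with its break
def pvALoop (input : List Int) (d : Int) : List Int → PySem.Dict Int Int → PySem.Dict Int Int
  | [], diffs => diffs
  | i :: rest, diffs =>
    -- input[i] / input[i-1] are always in range here (guard len ≥ maxStrenght), so pyGetD is exact
    let newValue := pvWrap (PySem.List.pyGetD input i 0 - d)
    if newValue = PySem.List.pyGetD input (i - 1) 0 then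
      pvALoop input d rest (diffs.modify d 0 (· + 1))
    else diffs

def aritmeticPredictorRaw (input : List Int) (maxStrenght : Int) : List (Int × Int) :=
  let differences : PySem.Dict Int Int :=
    PySem.Dict.ofList [(1, 0), (2, 0), (3, 0), (4, 0), (-1, 0), (-2, 0), (-3, 0), (-4, 0)]
  let differences :=
    if PySem.List.len input ≥ maxStrenght then
      differences.keys.foldl
        (fun D d =>
          pvALoop input d
            (PySem.List.pyRange (PySem.List.len input - 1) (PySem.List.len input - maxStrenght) (-1)) D)
        differences
    else differences
  differences.items

-- ===== PORT B =====
-- one step of B's inner 'for d in active' loop: increment matching d's and keep them in 'still'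
def pvBStep (cur prev : Int) (s : PySem.Dict Int Int × List Int) (d : Int) :
    PySem.Dict Int Int × List Int :=
  let v := pvWrap (cur - d)
  if v = prev then (s.1.modify d 0 (· + 1), s.2 ++ [d]) else s

-- B's single backward pass, carrying the list of still-active differences; stops when it empties
def pvBLoop (input : List Int) : List Int → PySem.Dict Int Int → List Int → PySem.Dict Int Int
  | [], counts, _ => counts
  | i :: rest, counts, active =>
    -- input[i] / input[i-1] are always in range here (guard len ≥ maxStrenght), so pyGetD is exact
    let cur := PySem.List.pyGetD input i 0
    let prev := PySem.List.pyGetD input (i - 1) 0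
    let p := active.foldl (pvBStep cur prev) (counts, [])
    if p.2 = [] then p.1 else pvBLoop input rest p.1 p.2

def aritmeticPredictorRaw_alt (input : List Int) (maxStrenght : Int) : List (Int × Int) :=
  let keys : List Int := [1, 2, 3, 4, -1, -2, -3, -4]
  let counts : PySem.Dict Int Int := PySem.Dict.ofList (keys.map (fun d => (d, 0)))
  let n := PySem.List.len input
  let counts :=
    if n ≥ maxStrenght then
      pvBLoop input (PySem.List.pyRange (n - 1) (n - maxStrenght) (-1)) counts keys
    else counts
  counts.items

-- ===== PRECONDITION & SPEC =====
def Spec_aritmeticPredictorRaw (input : List Int) (maxStrenght : Int) (out : List (Int × Int)) : Prop := out = aritmeticPredictorRaw_alt input maxStrenght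
instance (input : List Int) (maxStrenght : Int) (out : List (Int × Int)) : Decidable (Spec_aritmeticPredictorRaw input maxStrenght out) := by unfold Spec_aritmeticPredictorRaw; infer_instance

-- ===== CLAIM (what is proved, stated in full; the proofs are below) =====
def Claim_equal_aritmeticPredictorRaw : Prop := ∀ (input : List Int) (maxStrenght : Int), Dom_aritmeticPredictorRaw input maxStrenght → Spec_aritmeticPredictorRaw input maxStrenght (aritmeticPredictorRaw input maxStrenght)

-- ===== LEMMAS AND PROOFS =====

-- number of consecutive matching steps for difference d along the index list
def pvCnt (input : List Int) (d : Int) : List Int → Int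
  | [] => 0
  | i :: rest =>
    if pvWrap (PySem.List.pyGetD input i 0 - d) = PySem.List.pyGetD input (i - 1) 0 then
      1 + pvCnt input d rest
    else 0

theorem pvALoop_keys (input : List Int) (d : Int) (is : List Int)
    (D : PySem.Dict Int Int) (hd : D.contains d = true) :
    (pvALoop input d is D).keys = D.keys := by
  induction is generalizing D with
  | nil => rfl
  | cons i rest ih =>
    simp only [pvALoop]
    split
    · rw [ih _ (by simp [PySem.Dict.contains_modify, hd]),
        PySem.Dict.keys_modify, PySem.Dict.keys_insert_of_contains _ _ hd]
    · rfl

theorem pvALoop_getD (input : List Int) (d : Int) (is : List Int)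
    (D : PySem.Dict Int Int) (hd : D.contains d = true) (k : Int) :
    (pvALoop input d is D).getD k 0 =
      D.getD k 0 + if k = d then pvCnt input d is else 0 := by
  induction is generalizing D with
  | nil => simp [pvALoop, pvCnt]
  | cons i rest ih =>
    simp only [pvALoop, pvCnt]
    split
    · rw [ih _ (by simp [PySem.Dict.contains_modify, hd]), PySem.Dict.getD_modify]
      by_cases hk : k = d
      · simp [hk]; ring
      · simp [hk]
    · by_cases hk : k = d <;> simp [hk]

theorem pvAFold_keys (input : List Int) (is : List Int) (ks : List Int)
    (D : PySem.Dict Int Int) (hc : ∀ x ∈ ks, D.contains x = true) :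
    ((ks.foldl (fun D d => pvALoop input d is D) D)).keys = D.keys := by
  induction ks generalizing D with
  | nil => rfl
  | cons d ks ih =>
    simp only [List.foldl_cons]
    rw [ih]
    · exact pvALoop_keys input d is D (hc d (by simp))
    · intro x hx
      rw [PySem.Dict.contains_iff_mem_keys, pvALoop_keys input d is D (hc d (by simp)),
        ← PySem.Dict.contains_iff_mem_keys]
      exact hc x (by simp [hx])

theorem pvAFold_getD (input : List Int) (is : List Int) (ks : List Int)
    (D : PySem.Dict Int Int) (hnd : ks.Nodup) (hc : ∀ x ∈ ks, D.contains x = true) (k : Int) :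
    ((ks.foldl (fun D d => pvALoop input d is D) D)).getD k 0 =
      D.getD k 0 + if k ∈ ks then pvCnt input k is else 0 := by
  induction ks generalizing D with
  | nil => simp
  | cons d ks ih =>
    simp only [List.foldl_cons]
    have hd : D.contains d = true := hc d (by simp)
    rw [ih _ (List.Nodup.of_cons hnd)
        (fun x hx => by
          rw [PySem.Dict.contains_iff_mem_keys, pvALoop_keys input d is D hd,
            ← PySem.Dict.contains_iff_mem_keys]
          exact hc x (by simp [hx])),
      pvALoop_getD input d is D hd k]
    by_cases hk : k = d
    · subst hk
      have hkn : k ∉ ks := (List.nodup_cons.mp hnd).1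
      simp [hkn]
    · by_cases hks : k ∈ ks <;> simp [hk, hks]

theorem pvBFoldl_snd (cur prev : Int) (act : List Int)
    (D : PySem.Dict Int Int) (acc : List Int) :
    (act.foldl (pvBStep cur prev) (D, acc)).2 =
      acc ++ act.filter (fun d => decide (pvWrap (cur - d) = prev)) := by
  induction act generalizing D acc with
  | nil => simp
  | cons d act ih =>
    simp only [List.foldl_cons, pvBStep]
    split
    · next h => simp [ih, h]
    · next h => simp [ih, h]

theorem pvBFoldl_keys (cur prev : Int) (act : List Int)
    (D : PySem.Dict Int Int) (acc : List Int) (hc : ∀ x ∈ act, D.contains x = true) :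
    (act.foldl (pvBStep cur prev) (D, acc)).1.keys = D.keys := by
  induction act generalizing D acc with
  | nil => rfl
  | cons d act ih =>
    have hd : D.contains d = true := hc d (by simp)
    simp only [List.foldl_cons, pvBStep]
    split
    · rw [ih _ _ (fun x hx => by simp [PySem.Dict.contains_modify, hc x (by simp [hx])]),
        PySem.Dict.keys_modify, PySem.Dict.keys_insert_of_contains _ _ hd]
    · exact ih _ _ (fun x hx => hc x (by simp [hx]))

theorem pvBFoldl_getD (cur prev : Int) (act : List Int)
    (D : PySem.Dict Int Int) (acc : List Int) (hnd : act.Nodup) (k : Int) :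
    (act.foldl (pvBStep cur prev) (D, acc)).1.getD k 0 =
      D.getD k 0 + if k ∈ act ∧ pvWrap (cur - k) = prev then 1 else 0 := by
  induction act generalizing D acc with
  | nil => simp
  | cons d act ih =>
    simp only [List.foldl_cons, pvBStep]
    split
    · next h =>
      rw [ih _ _ (List.Nodup.of_cons hnd), PySem.Dict.getD_modify]
      by_cases hk : k = d
      · subst hk
        have hkn : k ∉ act := (List.nodup_cons.mp hnd).1
        simp [hkn, h]
      · by_cases hks : k ∈ act <;> simp [hk, hks]
    · next h =>
      rw [ih _ _ (List.Nodup.of_cons hnd)]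
      by_cases hk : k = d
      · subst hk
        have hkn : k ∉ act := (List.nodup_cons.mp hnd).1
        simp [hkn, h]
      · simp [hk]

theorem pvBLoop_keys (input : List Int) (is : List Int) (act : List Int)
    (D : PySem.Dict Int Int) (hc : ∀ x ∈ act, D.contains x = true) :
    (pvBLoop input is D act).keys = D.keys := by
  induction is generalizing D act with
  | nil => rfl
  | cons i rest ih =>
    simp only [pvBLoop]
    split
    · exact pvBFoldl_keys _ _ _ _ _ hc
    · rw [ih _ _ (fun x hx => by
        have hx' : x ∈ act := by
          have hs := pvBFoldl_snd (PySem.List.pyGetD input i 0) (PySem.List.pyGetD input (i - 1) 0) act D []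
          rw [hs, List.nil_append] at hx
          exact List.mem_of_mem_filter hx
        rw [PySem.Dict.contains_iff_mem_keys, pvBFoldl_keys _ _ _ _ _ hc,
          ← PySem.Dict.contains_iff_mem_keys]
        exact hc x hx')]
      exact pvBFoldl_keys _ _ _ _ _ hc

theorem pvBLoop_getD (input : List Int) (is : List Int) (act : List Int)
    (D : PySem.Dict Int Int) (hnd : act.Nodup) (hc : ∀ x ∈ act, D.contains x = true) (k : Int) :
    (pvBLoop input is D act).getD k 0 =
      D.getD k 0 + if k ∈ act then pvCnt input k is else 0 := by
  induction is generalizing D act with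
  | nil => simp [pvBLoop, pvCnt]
  | cons i rest ih =>
    simp only [pvBLoop]
    have hsnd := pvBFoldl_snd (PySem.List.pyGetD input i 0) (PySem.List.pyGetD input (i - 1) 0) act D []
    have hfst := pvBFoldl_getD (PySem.List.pyGetD input i 0) (PySem.List.pyGetD input (i - 1) 0) act D [] hnd
    split
    · next hemp =>
      rw [hfst k]
      rw [hsnd, List.nil_append] at hemp
      by_cases hk : k ∈ act
      · have hnm : ¬ pvWrap (PySem.List.pyGetD input i 0 - k) = PySem.List.pyGetD input (i - 1) 0 := by
          intro hm
          have : k ∈ act.filter (fun d => decide (pvWrap (PySem.List.pyGetD input i 0 - d) = PySem.List.pyGetD input (i - 1) 0)) :=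
            List.mem_filter.mpr ⟨hk, by simpa using hm⟩
          simp [hemp] at this
        simp [pvCnt, hk, hnm]
      · simp [hk]
    · next hemp =>
      rw [hsnd, List.nil_append] at hemp ⊢
      rw [ih _ _ (List.Nodup.filter _ hnd)
          (fun x hx => by
            rw [PySem.Dict.contains_iff_mem_keys, pvBFoldl_keys _ _ _ _ _ hc,
              ← PySem.Dict.contains_iff_mem_keys]
            exact hc x (List.mem_of_mem_filter hx)),
        hfst k]
      by_cases hk : k ∈ act
      · by_cases hm : pvWrap (PySem.List.pyGetD input i 0 - k) = PySem.List.pyGetD input (i - 1) 0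
        · simp [pvCnt, hk, hm, List.mem_filter]; ring
        · simp [pvCnt, hk, hm, List.mem_filter]
      · simp [hk, List.mem_filter]

-- ===== VERDICT (by name: the statement is the Claim_ definition above) =====
theorem aritmeticPredictorRaw_spec : Claim_equal_aritmeticPredictorRaw := by
  intro input maxStrenght _
  unfold Spec_aritmeticPredictorRaw aritmeticPredictorRaw aritmeticPredictorRaw_alt
  simp only [PySem.List.len_eq, ge_iff_le]
  set D0 : PySem.Dict Int Int :=
    PySem.Dict.ofList [(1, 0), (2, 0), (3, 0), (4, 0), (-1, 0), (-2, 0), (-3, 0), (-4, 0)] with hD0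
  set K : List Int := [1, 2, 3, 4, -1, -2, -3, -4] with hK
  set is : List Int :=
    PySem.List.pyRange ((input.length : Int) - 1) ((input.length : Int) - maxStrenght) (-1) with his
  have hkeys : D0.keys = K := by decide
  have hcont : ∀ x ∈ K, D0.contains x = true := by decide
  have hnd : K.Nodup := by decide
  have hB0 : PySem.Dict.ofList (K.map (fun d => (d, (0 : Int)))) = D0 := by decide
  rw [hB0, hkeys]
  by_cases hg : maxStrenght ≤ (input.length : Int)
  · rw [if_pos hg, if_pos hg]
    have hkeysA : ((K.foldl (fun D d => pvALoop input d is D) D0)).keys = K := by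
      rw [pvAFold_keys input is K D0 hcont, hkeys]
    have hkeysB : (pvBLoop input is D0 K).keys = K := by
      rw [pvBLoop_keys input is K D0 hcont, hkeys]
    rw [PySem.Dict.items_eq_map_keys _ (by rw [hkeysA]; exact hnd) 0,
      PySem.Dict.items_eq_map_keys _ (by rw [hkeysB]; exact hnd) 0, hkeysA, hkeysB]
    refine List.map_congr_left (fun k hk => ?_)
    rw [pvAFold_getD input is K D0 hnd hcont k, pvBLoop_getD input is K D0 hnd hcont k]
  · rw [if_neg hg, if_neg hg]
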